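-- pv_equiv track=rewrite | github.com/liu770807152/Python-Training | 8/knapsack.py | subset_sum_follow_up
-- ===== SOURCE A (Python) =====
-- def subset_sum_follow_up(w, remain):
--     # Base case: 装满背包，或者已经是最后一个物品
--     if len(w) == 0 or remain <= 0:
--         return remain
--     temp1 = temp2 = -1
--     # including w[0]
--     if w[0] <= remain:
--         temp1 = subset_sum_follow_up(w[1:], remain - w[0])
--     # excluding w[0]
--     temp2 = subset_sum_follow_up(w[1:], remain)
--     if temp1 >= 0 and temp2 >= 0:
--         return min(temp1, temp2)
--     else:
--         if temp1 > 0: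
--             return temp1
--         elif temp2 > 0:
--             return temp2
--         else:
--             return -1
-- ===== SOURCE B (Python) =====
-- def subset_sum_follow_up(w, remain):
--     # Same recurrence as the naive version, but keyed by (suffix index, remain)
--     # and memoized, turning the exponential tree into O(len(w) * #distinct remains).
--     memo = {}
--
--     def go(i, r):
--         if i >= len(w) or r <= 0:
--             return r
--         key = (i, r)
--         if key in memo:
--             return memo[key]
--         t1 = -1
--         if w[i] <= r:
--             t1 = go(i + 1, r - w[i])
--         t2 = go(i + 1, r)
--         if t1 >= 0 and t2 >= 0:
--             res = min(t1, t2)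
--         elif t1 > 0:
--             res = t1
--         elif t2 > 0:
--             res = t2
--         else:
--             res = -1
--         memo[key] = res
--         return res
--
--     return go(0, remain)
-- ===== Notes on version B (the rewrite author's own statement) =====
-- stated objective: faster
-- what changed: Replaced the naive exponential branch recursion over list slices by an index-based recursion memoized on (suffix index, remaining capacity), so each subproblem is solved once; intended as asymptotically faster (a timing run saw A time out at n=64 where B returned, but could not confirm a ratio at the small sizes both finish).
import Mathlib
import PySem

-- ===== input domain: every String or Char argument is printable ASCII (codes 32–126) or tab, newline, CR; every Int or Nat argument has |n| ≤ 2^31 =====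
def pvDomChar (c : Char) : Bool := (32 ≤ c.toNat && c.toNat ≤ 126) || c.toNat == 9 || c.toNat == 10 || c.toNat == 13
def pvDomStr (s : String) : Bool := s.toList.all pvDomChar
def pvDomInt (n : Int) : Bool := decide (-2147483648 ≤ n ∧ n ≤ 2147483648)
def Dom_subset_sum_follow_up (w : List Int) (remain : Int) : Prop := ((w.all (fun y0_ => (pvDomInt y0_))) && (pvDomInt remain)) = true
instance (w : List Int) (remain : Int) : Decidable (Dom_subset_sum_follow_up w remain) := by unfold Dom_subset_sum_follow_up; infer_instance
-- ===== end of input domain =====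

-- B memoizes A's exact recurrence, keyed by (suffix index, remaining capacity): each subproblem is solved once (intended as faster: A times out where B still returns; at the small sizes both finish a timing run could not confirm a ratio).

-- ===== PORT A =====
-- Literal port of A. The Python guard `len(w) == 0 or remain <= 0` is rendered
-- as the `[]` pattern (returns remain) plus the `remain ≤ 0` test on `x :: rest`.
def subset_sum_follow_up : List Int → Int → Int
  | [], remain => remain
  | x :: rest, remain =>
    if remain ≤ 0 then remain
    else
      let temp1 := if x ≤ remain then subset_sum_follow_up rest (remain - x) else -1
      let temp2 := subset_sum_follow_up rest remain
      if temp1 ≥ 0 ∧ temp2 ≥ 0 then min temp1 temp2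
      else if temp1 > 0 then temp1
      else if temp2 > 0 then temp2
      else -1

-- ===== PORT B =====
-- Port of Source B's inner `go(i, r)`: the memo dict is threaded through explicitly.
def ssfuGo (w : List Int) (i : Nat) (r : Int) (memo : PySem.Dict (Nat × Int) Int) :
    Int × PySem.Dict (Nat × Int) Int :=
  if h : w.length ≤ i ∨ r ≤ 0 then (r, memo) -- h used in decreasing_by
  else
    match memo.get? (i, r) with
    | some v => (v, memo)
    | none =>
      let wi := w.getD i 0
      let p1 := if wi ≤ r then ssfuGo w (i + 1) (r - wi) memo else (-1, memo)
      let p2 := ssfuGo w (i + 1) r p1.2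
      let res := if p1.1 ≥ 0 ∧ p2.1 ≥ 0 then min p1.1 p2.1
                 else if p1.1 > 0 then p1.1
                 else if p2.1 > 0 then p2.1
                 else -1
      (res, p2.2.insert (i, r) res)
termination_by w.length - i
decreasing_by all_goals (simp only [not_or, not_le] at h; omega)

def subset_sum_follow_up_alt (w : List Int) (remain : Int) : Int :=
  (ssfuGo w 0 remain PySem.Dict.empty).1

-- ===== PRECONDITION & SPEC =====
def Spec_subset_sum_follow_up (w : List Int) (remain : Int) (out : Int) : Prop := out = subset_sum_follow_up_alt w remain
instance (w : List Int) (remain : Int) (out : Int) : Decidable (Spec_subset_sum_follow_up w remain out) := by unfold Spec_subset_sum_follow_up; infer_instance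

-- ===== CLAIM (what is proved, stated in full; the proofs are below) =====
def Claim_equal_subset_sum_follow_up : Prop := ∀ (w : List Int) (remain : Int), Dom_subset_sum_follow_up w remain → Spec_subset_sum_follow_up w remain (subset_sum_follow_up w remain)

-- ===== LEMMAS AND PROOFS =====

-- A on a drop with the head exposed: the step case of A, phrased for `drop`.
lemma ssfu_drop_step (w : List Int) (i : Nat) (hi : i < w.length) (r : Int) (hr : ¬ r ≤ 0) :
    subset_sum_follow_up (w.drop i) r =
      (let temp1 := if w[i] ≤ r then subset_sum_follow_up (w.drop (i + 1)) (r - w[i]) else -1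
       let temp2 := subset_sum_follow_up (w.drop (i + 1)) r
       if temp1 ≥ 0 ∧ temp2 ≥ 0 then min temp1 temp2
       else if temp1 > 0 then temp1
       else if temp2 > 0 then temp2
       else -1) := by
  rw [List.drop_eq_getElem_cons hi]
  simp only [subset_sum_follow_up, if_neg hr]

-- Memo-table invariant: every stored value is the value of A on the matching suffix.
def ssfuInv (w : List Int) (memo : PySem.Dict (Nat × Int) Int) : Prop :=
  ∀ j s v, memo.get? (j, s) = some v → v = subset_sum_follow_up (w.drop j) s

lemma ssfuGo_correct (w : List Int) :
    ∀ n i r memo, w.length - i ≤ n → ssfuInv w memo →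
      (ssfuGo w i r memo).1 = subset_sum_follow_up (w.drop i) r ∧
      ssfuInv w (ssfuGo w i r memo).2 := by
  intro n
  induction n with
  | zero =>
    intro i r memo hn hinv
    have hi : w.length ≤ i := by omega
    rw [ssfuGo]
    by_cases hr : r ≤ 0
    · rw [dif_pos (Or.inr hr)]
      refine ⟨?_, hinv⟩
      simp [List.drop_eq_nil_of_le hi, subset_sum_follow_up]
    · rw [dif_pos (Or.inl hi)]
      refine ⟨?_, hinv⟩
      simp [List.drop_eq_nil_of_le hi, subset_sum_follow_up]
  | succ m ih =>
    intro i r memo hn hinv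
    rw [ssfuGo]
    by_cases hbase : w.length ≤ i ∨ r ≤ 0
    · rw [dif_pos hbase]
      refine ⟨?_, hinv⟩
      rcases hbase with hi | hr
      · simp [List.drop_eq_nil_of_le hi, subset_sum_follow_up]
      · cases hd : w.drop i with
        | nil => simp [subset_sum_follow_up]
        | cons x rest => simp [subset_sum_follow_up, hr]
    · rw [dif_neg hbase]
      simp only [not_or, not_le] at hbase
      obtain ⟨hi, hr⟩ := hbase
      have hi' : i < w.length := by omega
      have hr' : ¬ r ≤ 0 := by omega
      cases hm : memo.get? (i, r) with
      | some v =>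
        exact ⟨(hinv i r v hm).symm ▸ rfl, hinv⟩
      | none =>
        have hwi : w.getD i 0 = w[i] := List.getD_eq_getElem w 0 hi'
        have hm1 : w.length - (i + 1) ≤ m := by omega
        -- value of p1 and invariant of its memo
        by_cases hc : w.getD i 0 ≤ r
        · have h1 := ih (i + 1) (r - w.getD i 0) memo hm1 hinv
          have h2 := ih (i + 1) r (ssfuGo w (i + 1) (r - w.getD i 0) memo).2 hm1 h1.2
          simp only [if_pos hc]
          rw [hwi] at h1 hc
          have hres : (if (ssfuGo w (i+1) (r - w[i]) memo).1 ≥ 0 ∧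
                (ssfuGo w (i+1) r (ssfuGo w (i+1) (r - w[i]) memo).2).1 ≥ 0 then
                min (ssfuGo w (i+1) (r - w[i]) memo).1 (ssfuGo w (i+1) r (ssfuGo w (i+1) (r - w[i]) memo).2).1
              else if (ssfuGo w (i+1) (r - w[i]) memo).1 > 0 then (ssfuGo w (i+1) (r - w[i]) memo).1
              else if (ssfuGo w (i+1) r (ssfuGo w (i+1) (r - w[i]) memo).2).1 > 0 then
                (ssfuGo w (i+1) r (ssfuGo w (i+1) (r - w[i]) memo).2).1
              else -1) = subset_sum_follow_up (w.drop i) r := by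
            rw [ssfu_drop_step w i hi' r hr', h1.1]
            rw [hwi] at h2
            rw [h2.1]
            simp only [if_pos hc]
          rw [hwi]
          refine ⟨hres, ?_⟩
          intro j s v hv
          rw [PySem.Dict.get?_insert] at hv
          split at hv
          · rename_i hjs
            cases hv
            rw [Prod.mk.injEq] at hjs
            obtain ⟨hj, hs⟩ := hjs
            subst hj; subst hs
            exact hres.symm ▸ rfl
          · rw [hwi] at h2
            exact h2.2 j s v hv
        · have h2 := ih (i + 1) r memo hm1 hinv
          simp only [if_neg hc]
          rw [hwi] at hc
          have hres : (if (-1 : Int) ≥ 0 ∧ (ssfuGo w (i+1) r memo).1 ≥ 0 then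
                min (-1) (ssfuGo w (i+1) r memo).1
              else if (-1 : Int) > 0 then -1
              else if (ssfuGo w (i+1) r memo).1 > 0 then (ssfuGo w (i+1) r memo).1
              else -1) = subset_sum_follow_up (w.drop i) r := by
            rw [ssfu_drop_step w i hi' r hr', h2.1]
            simp only [if_neg hc]
          refine ⟨hres, ?_⟩
          intro j s v hv
          rw [PySem.Dict.get?_insert] at hv
          split at hv
          · rename_i hjs
            cases hv
            rw [Prod.mk.injEq] at hjs
            obtain ⟨hj, hs⟩ := hjs
            subst hj; subst hs
            exact hres.symm ▸ rfl
          · exact h2.2 j s v hv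

-- ===== VERDICT (by name: the statement is the Claim_ definition above) =====
theorem subset_sum_follow_up_spec : Claim_equal_subset_sum_follow_up := by
  intro w remain _
  unfold Spec_subset_sum_follow_up subset_sum_follow_up_alt
  have h := ssfuGo_correct w w.length 0 remain PySem.Dict.empty (by omega)
    (by intro j s v hv; simp [PySem.Dict.get?_empty] at hv)
  simpa using h.1.symm
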